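-- pv_equiv track=rewrite | github.com/yzhbradoodrrpurp/CS61A | Projects/cats/cats.py | switch_test
-- ===== SOURCE A (Python) =====
-- def switch_test(typed, source):
--     letter = typed[0]
--     typed = typed[1:]
--     watch_list = [typed[:i] + letter + typed[i:] for i in range(1, len(typed) - 1)]
--     watch_list.append(letter + typed)
--     watch_list.append(typed + letter)
--
--     for i in range(len(watch_list)):
--         if watch_list[i] == source:
--             return i
--     return 0
-- ===== SOURCE B (Python) =====
-- def switch_test(typed, source):
--     letter = typed[0]
--     rest = typed[1:]
--     n = len(rest)
--     if len(source) != n + 1: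
--         return 0
--     # longest common prefix of rest and source
--     j = 0
--     while j < n and rest[j] == source[j]:
--         j += 1
--     # longest common suffix alignment: rest[n-1-k] vs source[n-k]
--     k = 0
--     while k < n and rest[n - 1 - k] == source[n - k]:
--         k += 1
--     base = max(n - 2, 0)
--     p = max(1, n - k)
--     hi = min(j, n - 2)
--     while p <= hi:
--         if source[p] == letter:
--             return p - 1
--         p += 1
--     if k >= n and source[0] == letter:
--         return base
--     if j >= n and source[n] == letter:
--         return base + 1
--     return 0
-- ===== Notes on version B (the rewrite author's own statement) =====
-- stated objective: faster
-- what changed: B replaces A's construction of all n candidate strings and a linear scan over them (quadratic work) by a single prefix/suffix divergence scan of rest vs source that locates the valid insertion positions directly in linear time.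
import Mathlib
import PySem

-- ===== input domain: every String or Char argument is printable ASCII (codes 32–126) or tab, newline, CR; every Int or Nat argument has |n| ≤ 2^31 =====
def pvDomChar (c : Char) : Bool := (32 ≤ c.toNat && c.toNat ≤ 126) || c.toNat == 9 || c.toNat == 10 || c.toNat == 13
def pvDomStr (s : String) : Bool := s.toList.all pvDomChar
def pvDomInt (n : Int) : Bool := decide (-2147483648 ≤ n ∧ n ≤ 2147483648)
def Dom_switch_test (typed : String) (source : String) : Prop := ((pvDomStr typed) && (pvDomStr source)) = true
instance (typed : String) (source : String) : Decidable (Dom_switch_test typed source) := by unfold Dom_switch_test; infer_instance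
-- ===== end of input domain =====

-- B replaces A's quadratic build-all-candidates-and-scan with a linear prefix/suffix divergence scan; a timing run measured it faster.

-- ===== PORT A =====
-- the 'for i in range(len(watch_list)): if watch_list[i] == source: return i / return 0' loop
def pvSearchA (wl : List (List Char)) (s : List Char) (i : Int) : Int :=
  match wl with
  | [] => 0
  | w :: ws => if w = s then i else pvSearchA ws s (i + 1)

def switch_test (typed : String) (source : String) : Int :=
  match PySem.List.pyGet? typed.toList 0 with
  | none => 0   -- Python raises IndexError here (typed == ""); excluded by Pre_
  | some letter =>
    let t := PySem.List.slice typed.toList (some 1) none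
    let watch_list :=
      (PySem.List.pyRange 1 (PySem.List.len t - 1) 1).map
        (fun i => PySem.List.slice t none (some i) ++ [letter] ++ PySem.List.slice t (some i) none)
    let watch_list := watch_list ++ [[letter] ++ t]
    let watch_list := watch_list ++ [t ++ [letter]]
    pvSearchA watch_list source.toList 0

-- ===== PORT B =====
-- 'while j < n and rest[j] == source[j]: j += 1'
def pvLcp (r s : List Char) (j : Nat) : Nat :=
  if h : j < r.length then
    if r[j]? = s[j]? then pvLcp r s (j + 1) else j
  else j
  termination_by r.length - j

-- 'while k < n and rest[n - 1 - k] == source[n - k]: k += 1'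
def pvLcs (r s : List Char) (k : Nat) : Nat :=
  if h : k < r.length then
    if r[r.length - 1 - k]? = s[r.length - k]? then pvLcs r s (k + 1) else k
  else k
  termination_by r.length - k

-- 'while p <= hi: if source[p] == letter: return p - 1; p += 1'
def pvScan (s : List Char) (letter : Char) (hi : Int) (p : Int) : Option Int :=
  if h : p ≤ hi then
    if PySem.List.pyGet? s p = some letter then some (p - 1)
    else pvScan s letter hi (p + 1)
  else none
  termination_by (hi + 1 - p).toNat
  decreasing_by omega

def switch_test_alt (typed : String) (source : String) : Int :=
  match PySem.List.pyGet? typed.toList 0 with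
  | none => 0   -- Source B raises IndexError here too (typed == ""); excluded by Pre_
  | some letter =>
    let rest := PySem.List.slice typed.toList (some 1) none
    let s := source.toList
    let n : Int := PySem.List.len rest
    if PySem.List.len s ≠ n + 1 then 0
    else
      let j : Int := (pvLcp rest s 0 : Int)
      let k : Int := (pvLcs rest s 0 : Int)
      let base : Int := max (n - 2) 0
      match pvScan s letter (min j (n - 2)) (max 1 (n - k)) with
      | some v => v
      | none =>
        if k ≥ n ∧ PySem.List.pyGet? s 0 = some letter then base
        else if j ≥ n ∧ PySem.List.pyGet? s n = some letter then base + 1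
        else 0

-- ===== PRECONDITION & SPEC =====
-- Pre_ excludes exactly the inputs where A raises IndexError: typed == "" (typed[0] fails; B fails identically).
def Pre_switch_test (typed : String) (source : String) : Prop := typed ≠ ""
instance (typed : String) (source : String) : Decidable (Pre_switch_test typed source) := by unfold Pre_switch_test; infer_instance
def pvWitness_switch_test : String × String := ("ab", "ba")

def Spec_switch_test (typed : String) (source : String) (out : Int) : Prop := out = switch_test_alt typed source
instance (typed : String) (source : String) (out : Int) : Decidable (Spec_switch_test typed source out) := by unfold Spec_switch_test; infer_instance

-- ===== CLAIM (what is proved, stated in full; the proofs are below) =====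
def Claim_equal_switch_test : Prop := ∀ (typed : String) (source : String), Dom_switch_test typed source → Pre_switch_test typed source → Spec_switch_test typed source (switch_test typed source)

-- ===== LEMMAS AND PROOFS =====

-- the candidate string: typed-with-first-letter-removed with that letter inserted at position p
def pvCand (L : Char) (r : List Char) (p : Nat) : List Char := r.take p ++ L :: r.drop p

theorem pvCand_length (L : Char) (r : List Char) (p : Nat) : (pvCand L r p).length = r.length + 1 := by
  simp [pvCand]

theorem pvCand_zero (L : Char) (r : List Char) : pvCand L r 0 = [L] ++ r := by simp [pvCand]

theorem pvCand_len (L : Char) (r : List Char) : pvCand L r r.length = r ++ [L] := by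
  simp [pvCand]

theorem pvLcp_spec : ∀ (m : Nat) (r s : List Char) (a : Nat), a ≤ r.length → r.length - a ≤ m →
    a ≤ pvLcp r s a ∧ pvLcp r s a ≤ r.length ∧
    (∀ i, a ≤ i → i < pvLcp r s a → r[i]? = s[i]?) ∧
    (pvLcp r s a < r.length → r[pvLcp r s a]? ≠ s[pvLcp r s a]?) := by
  intro m
  induction m with
  | zero =>
      intro r s a ha hm
      have hae : ¬ a < r.length := by omega
      rw [pvLcp, dif_neg hae]
      exact ⟨le_refl a, ha, fun i h1 h2 => by omega, fun h => absurd h hae⟩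
  | succ m ih =>
      intro r s a ha hm
      rw [pvLcp]
      by_cases h1 : a < r.length
      · rw [dif_pos h1]
        by_cases h2 : r[a]? = s[a]?
        · rw [if_pos h2]
          obtain ⟨ih1, ih2, ih3, ih4⟩ := ih r s (a + 1) (by omega) (by omega)
          refine ⟨by omega, ih2, ?_, ih4⟩
          intro i hai hi
          rcases Nat.eq_or_lt_of_le hai with h | h
          · exact h ▸ h2
          · exact ih3 i h hi
        · rw [if_neg h2]
          exact ⟨le_refl a, le_of_lt h1, fun i h1' h2' => by omega, fun _ => h2⟩
      · rw [dif_neg h1]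
        exact ⟨le_refl a, ha, fun i h1' h2' => by omega, fun h => absurd h h1⟩

theorem pvLcs_spec : ∀ (m : Nat) (r s : List Char) (a : Nat), a ≤ r.length → r.length - a ≤ m →
    a ≤ pvLcs r s a ∧ pvLcs r s a ≤ r.length ∧
    (∀ i, a ≤ i → i < pvLcs r s a → r[r.length - 1 - i]? = s[r.length - i]?) ∧
    (pvLcs r s a < r.length → r[r.length - 1 - pvLcs r s a]? ≠ s[r.length - pvLcs r s a]?) := by
  intro m
  induction m with
  | zero =>
      intro r s a ha hm
      have hae : ¬ a < r.length := by omega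
      rw [pvLcs, dif_neg hae]
      exact ⟨le_refl a, ha, fun i h1 h2 => by omega, fun h => absurd h hae⟩
  | succ m ih =>
      intro r s a ha hm
      rw [pvLcs]
      by_cases h1 : a < r.length
      · rw [dif_pos h1]
        by_cases h2 : r[r.length - 1 - a]? = s[r.length - a]?
        · rw [if_pos h2]
          obtain ⟨ih1, ih2, ih3, ih4⟩ := ih r s (a + 1) (by omega) (by omega)
          refine ⟨by omega, ih2, ?_, ih4⟩
          intro i hai hi
          rcases Nat.eq_or_lt_of_le hai with h | h
          · exact h ▸ h2
          · exact ih3 i h hi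
        · rw [if_neg h2]
          exact ⟨le_refl a, le_of_lt h1, fun i h1' h2' => by omega, fun _ => h2⟩
      · rw [dif_neg h1]
        exact ⟨le_refl a, ha, fun i h1' h2' => by omega, fun h => absurd h h1⟩

theorem pvScan_eq_none (s : List Char) (L : Char) (hi : Int) :
    ∀ (m : Nat) (p : Int), (hi + 1 - p).toNat ≤ m →
      (∀ q : Int, p ≤ q → q ≤ hi → PySem.List.pyGet? s q ≠ some L) →
      pvScan s L hi p = none := by
  intro m
  induction m with
  | zero =>
      intro p hm h
      rw [pvScan, dif_neg (by omega)]
  | succ m ih =>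
      intro p hm h
      rw [pvScan]
      by_cases h1 : p ≤ hi
      · rw [dif_pos h1, if_neg (h p (le_refl p) h1)]
        exact ih (p + 1) (by omega) (fun q hq1 hq2 => h q (by omega) hq2)
      · rw [dif_neg h1]

theorem pvScan_eq_some (s : List Char) (L : Char) (hi q : Int)
    (hq : PySem.List.pyGet? s q = some L) (hqh : q ≤ hi) :
    ∀ (m : Nat) (p : Int), (q - p).toNat ≤ m → p ≤ q →
      (∀ q' : Int, p ≤ q' → q' < q → PySem.List.pyGet? s q' ≠ some L) →
      pvScan s L hi p = some (q - 1) := by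
  intro m
  induction m with
  | zero =>
      intro p hm hpq h
      have : p = q := by omega
      subst this
      rw [pvScan, dif_pos hqh, if_pos hq]
  | succ m ih =>
      intro p hm hpq h
      rcases eq_or_lt_of_le hpq with he | hlt
      · subst he
        rw [pvScan, dif_pos hqh, if_pos hq]
      · rw [pvScan, dif_pos (by omega), if_neg (h p (le_refl p) hlt)]
        exact ih (p + 1) (by omega) (by omega) (fun q' h1 h2 => h q' (by omega) h2)

theorem pvSearchA_eq_none (s : List Char) :
    ∀ (wl : List (List Char)) (i : Int), (∀ w ∈ wl, w ≠ s) → pvSearchA wl s i = 0 := by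
  intro wl
  induction wl with
  | nil => intro i _; rfl
  | cons w ws ih =>
      intro i h
      simp only [pvSearchA]
      rw [if_neg (h w (by simp))]
      exact ih (i + 1) (fun w' hw' => h w' (by simp [hw']))

theorem pvSearchA_append (s : List Char) :
    ∀ (W1 W2 : List (List Char)) (i : Int), (∀ w ∈ W1, w ≠ s) →
      pvSearchA (W1 ++ W2) s i = pvSearchA W2 s (i + W1.length) := by
  intro W1
  induction W1 with
  | nil => intro W2 i _; simp
  | cons w ws ih =>
      intro W2 i h
      simp only [List.cons_append, pvSearchA]
      rw [if_neg (h w (by simp))]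
      rw [ih W2 (i + 1) (fun w' hw' => h w' (by simp [hw']))]
      congr 1
      simp only [List.length_cons]
      push_cast
      ring

theorem pvSearchA_first (s : List Char) :
    ∀ (wl : List (List Char)) (t0 : Nat) (i : Int) (h0 : t0 < wl.length),
      wl[t0] = s → (∀ t, (ht : t < t0) → wl[t]'(by omega) ≠ s) → pvSearchA wl s i = i + t0 := by
  intro wl
  induction wl with
  | nil => intro t0 i h0; simp at h0
  | cons w ws ih =>
      intro t0 i h0 hW hmin
      cases t0 with
      | zero =>
          simp only [List.getElem_cons_zero] at hW
          simp [pvSearchA, hW]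
      | succ t =>
          have hw : w ≠ s := by
            have := hmin 0 (by omega)
            simpa using this
          simp only [pvSearchA]
          rw [if_neg hw]
          rw [ih t (i + 1) (by simpa using h0) (by simpa using hW)
            (fun t' ht' => by simpa using hmin (t' + 1) (by omega))]
          push_cast
          ring

theorem pvTake_eq_iff (r s : List Char) (p : Nat) (hp : p ≤ r.length) (hps : p ≤ s.length) :
    r.take p = s.take p ↔ p ≤ pvLcp r s 0 := by
  obtain ⟨h1, h2, h3, h4⟩ := pvLcp_spec r.length r s 0 (by omega) (by omega)
  constructor
  · intro ht
    by_contra hc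
    have hcp : pvLcp r s 0 < p := by omega
    have hlt : pvLcp r s 0 < r.length := by omega
    apply h4 hlt
    have := congrArg (fun l => l[pvLcp r s 0]?) ht
    simpa [List.getElem?_take, hcp] using this
  · intro hle
    apply List.ext_getElem
    · simp; omega
    · intro i hi1 hi2
      simp only [List.length_take] at hi1
      have hip : i < p := by omega
      have := h3 i (by omega) (by omega)
      rw [List.getElem_take, List.getElem_take]
      have hir : i < r.length := by omega
      have his : i < s.length := by omega
      rw [List.getElem?_eq_getElem hir, List.getElem?_eq_getElem his] at this
      exact Option.some.inj this

theorem pvDrop_eq_iff (r s : List Char) (p : Nat) (hp : p ≤ r.length) (hs : s.length = r.length + 1) :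
    r.drop p = s.drop (p + 1) ↔ r.length - p ≤ pvLcs r s 0 := by
  obtain ⟨h1, h2, h3, h4⟩ := pvLcs_spec r.length r s 0 (by omega) (by omega)
  constructor
  · intro hd
    by_contra hc
    have hKlt : pvLcs r s 0 < r.length := by omega
    apply h4 hKlt
    have := congrArg (fun l => l[r.length - 1 - pvLcs r s 0 - p]?) hd
    simp only [List.getElem?_drop] at this
    have e1 : p + (r.length - 1 - pvLcs r s 0 - p) = r.length - 1 - pvLcs r s 0 := by omega
    have e2 : p + 1 + (r.length - 1 - pvLcs r s 0 - p) = r.length - pvLcs r s 0 := by omega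
    rw [e1, e2] at this
    exact this
  · intro hle
    apply List.ext_getElem
    · simp; omega
    · intro t ht1 ht2
      simp only [List.length_drop] at ht1
      rw [List.getElem_drop, List.getElem_drop]
      have hi : r.length - 1 - p - t < pvLcs r s 0 := by omega
      have := h3 _ (by omega) hi
      have e1 : r.length - 1 - (r.length - 1 - p - t) = p + t := by omega
      have e2 : r.length - (r.length - 1 - p - t) = p + 1 + t := by omega
      rw [e1, e2] at this
      have hr : p + t < r.length := by omega
      have hss : p + 1 + t < s.length := by omega
      rw [List.getElem?_eq_getElem hr, List.getElem?_eq_getElem hss] at this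
      exact Option.some.inj this

theorem pvCand_eq_iff (L : Char) (r s : List Char) (p : Nat) (hp : p ≤ r.length)
    (hs : s.length = r.length + 1) :
    pvCand L r p = s ↔ (p ≤ pvLcp r s 0 ∧ r.length - p ≤ pvLcs r s 0 ∧ s[p]? = some L) := by
  have hps : p < s.length := by omega
  have hdecomp : s = s.take p ++ s[p] :: s.drop (p + 1) := by
    conv_lhs => rw [← List.take_append_drop p s]
    rw [List.drop_eq_getElem_cons hps]
  constructor
  · intro h
    rw [hdecomp] at h
    unfold pvCand at h
    have hlen : (r.take p).length = (s.take p).length := by simp; omega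
    obtain ⟨h1, h2⟩ := List.append_inj h hlen
    injection h2 with h2a h2b
    refine ⟨(pvTake_eq_iff r s p hp (by omega)).mp h1, (pvDrop_eq_iff r s p hp hs).mp h2b, ?_⟩
    rw [List.getElem?_eq_getElem hps, h2a]
  · rintro ⟨h1, h2, h3⟩
    rw [hdecomp]
    unfold pvCand
    rw [(pvTake_eq_iff r s p hp (by omega)).mpr h1]
    rw [← (pvDrop_eq_iff r s p hp hs).mpr h2]
    rw [List.getElem?_eq_getElem hps] at h3
    rw [← Option.some.inj h3]

theorem pvWatchList_eq (L : Char) (r : List Char) :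
    (PySem.List.pyRange 1 (PySem.List.len r - 1) 1).map
        (fun i => PySem.List.slice r none (some i) ++ [L] ++ PySem.List.slice r (some i) none)
      = (List.range (r.length - 2)).map (fun t => pvCand L r (t + 1)) := by
  rw [PySem.List.len_eq, PySem.List.pyRange_one, List.map_map]
  have he : ((r.length : Int) - 1 - 1).toNat = r.length - 2 := by omega
  rw [he]
  apply List.map_congr_left
  intro k _
  simp only [Function.comp_apply]
  have hc : (1 : Int) + (k : Int) = ((k + 1 : Nat) : Int) := by push_cast; ring
  rw [hc, PySem.List.slice_to_natCast, PySem.List.slice_from_natCast]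
  simp [pvCand]

theorem pvMain (L : Char) (r s : List Char) :
    pvSearchA ((List.range (r.length - 2)).map (fun t => pvCand L r (t + 1)) ++ [[L] ++ r] ++ [r ++ [L]]) s 0
      =
    (if (PySem.List.len s ≠ PySem.List.len r + 1) then 0
     else
       match pvScan s L (min ((pvLcp r s 0 : Int)) ((PySem.List.len r) - 2))
           (max 1 ((PySem.List.len r) - (pvLcs r s 0 : Int))) with
       | some v => v
       | none =>
         if ((pvLcs r s 0 : Int) ≥ PySem.List.len r ∧ PySem.List.pyGet? s 0 = some L) then
           max ((PySem.List.len r) - 2) 0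
         else if ((pvLcp r s 0 : Int) ≥ PySem.List.len r ∧ PySem.List.pyGet? s (PySem.List.len r) = some L) then
           max ((PySem.List.len r) - 2) 0 + 1
         else 0) := by
  simp only [PySem.List.len_eq]
  rw [← pvCand_zero L r, ← pvCand_len L r, List.append_assoc]
  by_cases hlen : s.length = r.length + 1
  · rw [if_neg (by push_cast [hlen]; omega)]
    obtain ⟨hj0, hjn, hjp, hjm⟩ := pvLcp_spec r.length r s 0 (by omega) (by omega)
    obtain ⟨hk0, hkn, hkp, hkm⟩ := pvLcs_spec r.length r s 0 (by omega) (by omega)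
    by_cases hex : ∃ t, t < r.length - 2 ∧ pvCand L r (t + 1) = s
    · -- first match inside the comprehension part
      classical
      set t0 := Nat.find hex with ht0def
      obtain ⟨ht0m, ht0c⟩ := Nat.find_spec hex
      obtain ⟨hcj, hck, hcL⟩ := (pvCand_eq_iff L r s (t0 + 1) (by omega) hlen).mp ht0c
      -- A side: first matching index is t0
      have hA : pvSearchA ((List.range (r.length - 2)).map (fun t => pvCand L r (t + 1)) ++
          ([pvCand L r 0] ++ [pvCand L r r.length])) s 0 = (t0 : Int) := by
        rw [pvSearchA_first s _ t0 0 (by simp; omega) ?_ ?_]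
        · simp
        · rw [List.getElem_append_left (by simp; omega), List.getElem_map, List.getElem_range]
          exact ht0c
        · intro t ht
          rw [List.getElem_append_left (by simp; omega), List.getElem_map, List.getElem_range]
          exact fun hc => Nat.find_min hex ht ⟨by omega, hc⟩
      rw [hA]
      -- B side: the scan stops exactly at q = t0 + 1
      have hq' : PySem.List.pyGet? s ((t0 + 1 : Nat) : Int) = some L := by
        rw [PySem.List.pyGet?_natCast]; exact hcL
      have hqh : ((t0 + 1 : Nat) : Int) ≤ min ((pvLcp r s 0 : Int)) ((r.length : Int) - 2) := by
        apply le_min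
        · exact_mod_cast hcj
        · push_cast; omega
      have hple : max 1 ((r.length : Int) - (pvLcs r s 0 : Int)) ≤ ((t0 + 1 : Nat) : Int) := by
        apply max_le
        · push_cast; omega
        · push_cast; omega
      have hscan : pvScan s L (min ((pvLcp r s 0 : Int)) ((r.length : Int) - 2))
          (max 1 ((r.length : Int) - (pvLcs r s 0 : Int))) = some (((t0 + 1 : Nat) : Int) - 1) := by
        apply pvScan_eq_some s L _ _ hq' hqh
          ((((t0 + 1 : Nat) : Int) - max 1 ((r.length : Int) - (pvLcs r s 0 : Int))).toNat)
          _ (le_refl _) hple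
        intro q' h1 h2 hcontra
        have h1' : (1 : Int) ≤ q' := le_trans (le_max_left _ _) h1
        have h1'' : ((r.length : Int) - (pvLcs r s 0 : Int)) ≤ q' := le_trans (le_max_right _ _) h1
        have hq'nat : q' = ((q'.toNat : Nat) : Int) := by omega
        set p' := q'.toNat with hp'def
        have hp1 : 1 ≤ p' := by omega
        have hp2 : p' ≤ t0 := by omega
        have hcand : pvCand L r p' = s := by
          apply (pvCand_eq_iff L r s p' (by omega) hlen).mpr
          refine ⟨by omega, by omega, ?_⟩
          rw [hq'nat] at hcontra
          simpa using hcontra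
        have : pvCand L r ((p' - 1) + 1) = s := by
          have he : (p' - 1) + 1 = p' := by omega
          rw [he]; exact hcand
        exact Nat.find_min hex (show p' - 1 < t0 by omega) ⟨by omega, this⟩
      rw [hscan]
      push_cast
      ring
    · -- no match inside the comprehension part
      have hnomap : ∀ w ∈ (List.range (r.length - 2)).map (fun t => pvCand L r (t + 1)), w ≠ s := by
        intro w hw
        obtain ⟨t, ht, rfl⟩ := by simpa using hw
        exact fun hc => hex ⟨t, ht, hc⟩
      have hscan : pvScan s L (min ((pvLcp r s 0 : Int)) ((r.length : Int) - 2))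
          (max 1 ((r.length : Int) - (pvLcs r s 0 : Int))) = none := by
        apply pvScan_eq_none s L _ ((min ((pvLcp r s 0 : Int)) ((r.length : Int) - 2) + 1 -
          max 1 ((r.length : Int) - (pvLcs r s 0 : Int))).toNat) _ (le_refl _)
        intro q h1 h2 hcontra
        have h1' : (1 : Int) ≤ q := le_trans (le_max_left _ _) h1
        have h1'' : ((r.length : Int) - (pvLcs r s 0 : Int)) ≤ q := le_trans (le_max_right _ _) h1
        have h2j : q ≤ (pvLcp r s 0 : Int) := le_trans h2 (min_le_left _ _)
        have h2n : q ≤ (r.length : Int) - 2 := le_trans h2 (min_le_right _ _)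
        have hqnat : q = ((q.toNat : Nat) : Int) := by omega
        set p' := q.toNat with hp'def
        have hcand : pvCand L r p' = s := by
          apply (pvCand_eq_iff L r s p' (by omega) hlen).mpr
          refine ⟨by omega, by omega, ?_⟩
          rw [hqnat] at hcontra
          simpa using hcontra
        have : pvCand L r ((p' - 1) + 1) = s := by
          have he : (p' - 1) + 1 = p' := by omega
          rw [he]; exact hcand
        exact hex ⟨p' - 1, by omega, this⟩
      rw [hscan]
      rw [pvSearchA_append s _ _ 0 hnomap]
      simp only [List.singleton_append, List.length_map, List.length_range, pvSearchA]
      by_cases h0 : pvCand L r 0 = s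
      · obtain ⟨-, hk, hL0⟩ := (pvCand_eq_iff L r s 0 (by omega) hlen).mp h0
        rw [if_pos h0]
        rw [if_pos ⟨by exact_mod_cast Nat.cast_le.mpr (by omega), by simpa [PySem.List.pyGet?_zero] using hL0⟩]
        omega
      · rw [if_neg h0]
        have hc1 : ¬ ((pvLcs r s 0 : Int) ≥ (r.length : Int) ∧ PySem.List.pyGet? s 0 = some L) := by
          rintro ⟨hkge, hL0⟩
          apply h0
          apply (pvCand_eq_iff L r s 0 (by omega) hlen).mpr
          refine ⟨by omega, by omega, ?_⟩
          simpa [PySem.List.pyGet?_zero] using hL0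
        rw [if_neg hc1]
        by_cases hn : pvCand L r r.length = s
        · obtain ⟨hj, -, hLn⟩ := (pvCand_eq_iff L r s r.length (by omega) hlen).mp hn
          rw [if_pos hn]
          rw [if_pos ⟨by exact_mod_cast Nat.cast_le.mpr (by omega), by simpa using hLn⟩]
          omega
        · rw [if_neg hn]
          have hc2 : ¬ ((pvLcp r s 0 : Int) ≥ (r.length : Int) ∧ PySem.List.pyGet? s (r.length : Int) = some L) := by
            rintro ⟨hjge, hLn⟩
            apply hn
            apply (pvCand_eq_iff L r s r.length (by omega) hlen).mpr
            refine ⟨by omega, by omega, ?_⟩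
            simpa using hLn
          rw [if_neg hc2]
  · rw [if_pos (by omega)]
    apply pvSearchA_eq_none
    intro w hw
    have hwlen : w.length = r.length + 1 := by
      rcases (by simpa using hw : (∃ t, t < r.length - 2 ∧ pvCand L r (t + 1) = w) ∨
          w = pvCand L r 0 ∨ w = pvCand L r r.length) with ⟨t, -, rfl⟩ | rfl | rfl <;>
        simp [pvCand_length]
    exact fun hc => hlen (by rw [← hc, hwlen])

-- ===== VERDICT (by name: the statement is the Claim_ definition above) =====
theorem switch_test_spec : Claim_equal_switch_test := by
  intro typed source _ hpre
  unfold Spec_switch_test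
  obtain ⟨c, r, hts⟩ : ∃ c r, typed.toList = c :: r := by
    cases h : typed.toList with
    | nil =>
        exact absurd (String.toList_eq_nil_iff.mp h) hpre
    | cons c r => exact ⟨c, r, rfl⟩
  unfold switch_test switch_test_alt
  rw [hts]
  simp only [PySem.List.pyGet?_zero_cons, PySem.List.slice_from_one, List.tail_cons]
  rw [pvWatchList_eq]
  exact pvMain c r source.toList
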